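-- pv_equiv track=rewrite | github.com/ngaustin/open_spiel | open_spiel/python/algorithms/offline_psro/A_pre_training/game_specific_modules/bargaining_smart_random_policy.py | vector_to_item_integers
-- ===== SOURCE A (Python) =====
-- def vector_to_item_integers(vector, num_item_types):
--     """
--     Any indicator vector (pool, value, offers) contains information regarding the various item types. If we split the vector into num_item_types pieces,
--     each piece describes how many/how valuable each item is (depending on the context i.e. pool, value, or offer vector). This value can take on a variety
--     of values 0-[some kind of max]. Hence, each piece describing one item should be of length [some kind of max] + 1 to include 0 as an option.
--     Hence, the value of interest will be sum(vector_piece) - 1. We return one of these values for each item type.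
--     """
--     total_elements = len(vector)
--     assert total_elements % num_item_types == 0
--     vector_subset_length = int(total_elements / num_item_types)
--
--     integer_vector = []
--     for i in range(num_item_types):
--         value = sum(vector[i*vector_subset_length: (i+1)*vector_subset_length]) - 1
--         integer_vector.append(value)
--
--     return integer_vector
-- ===== SOURCE B (Python) =====
-- def vector_to_item_integers(vector, num_item_types):
--     total_elements = len(vector)
--     assert total_elements % num_item_types == 0
--     subset_length = total_elements // num_item_types
--     integer_vector = [-1] * num_item_types
--     for idx, val in enumerate(vector):
--         integer_vector[idx // subset_length] += val
--     return integer_vector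
-- ===== Notes on version B (the rewrite author's own statement) =====
-- stated objective: alternative
-- what changed: B makes one pass over the vector, distributing each element into a pre-initialized accumulator array of -1s by index // subset_length, instead of building and summing num_item_types slices.
-- outside the precondition, e.g. on vector_to_item_integers([1, 1], -2): A returns [], B raises IndexError
import Mathlib
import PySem

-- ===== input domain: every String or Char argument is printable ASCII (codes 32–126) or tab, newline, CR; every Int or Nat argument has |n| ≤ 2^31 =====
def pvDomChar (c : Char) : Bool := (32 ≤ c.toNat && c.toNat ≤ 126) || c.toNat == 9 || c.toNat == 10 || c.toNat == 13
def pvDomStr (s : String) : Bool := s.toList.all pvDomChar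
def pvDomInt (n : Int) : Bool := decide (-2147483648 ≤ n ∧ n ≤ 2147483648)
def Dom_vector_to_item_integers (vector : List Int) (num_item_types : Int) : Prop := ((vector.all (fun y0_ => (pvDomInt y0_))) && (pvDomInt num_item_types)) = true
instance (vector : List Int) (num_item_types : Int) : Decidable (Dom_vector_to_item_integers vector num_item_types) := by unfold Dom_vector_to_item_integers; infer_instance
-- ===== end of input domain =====

-- B replaces A's per-bucket slice-and-sum loop by a single pass over the vector that
-- distributes each element into a pre-initialized accumulator array (objective: alternative).

-- ===== PORT A =====
def vector_to_item_integers (vector : List Int) (num_item_types : Int) : List Int :=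
  let total_elements : Int := PySem.List.len vector
  -- assert total_elements % num_item_types == 0  → raises outside Pre_
  -- int(total_elements / num_item_types) → PySem.Int.truncdiv (exact: |values| < 2^53)
  let vector_subset_length : Int := PySem.Int.truncdiv total_elements num_item_types
  (PySem.List.pyRange 0 num_item_types 1).foldl
    (fun integer_vector i =>
      integer_vector ++
        [(PySem.List.slice vector (some (i * vector_subset_length))
            (some ((i + 1) * vector_subset_length))).sum - 1])
    []

-- ===== PORT B =====
def vector_to_item_integers_alt (vector : List Int) (num_item_types : Int) : List Int :=
  let total_elements : Int := PySem.List.len vector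
  -- assert total_elements % num_item_types == 0  → raises outside Pre_
  let subset_length : Int := PySem.Int.floordiv total_elements num_item_types
  -- integer_vector[j] += val: pyGetD/pySetD are the total forms; under Pre_ j is always in range
  (PySem.List.enumerate vector 0).foldl
    (fun integer_vector p =>
      PySem.List.pySetD integer_vector (PySem.Int.floordiv p.1 subset_length)
        (PySem.List.pyGetD integer_vector (PySem.Int.floordiv p.1 subset_length) 0 + p.2))
    (PySem.List.pyRepeat [(-1 : Int)] num_item_types)

-- ===== PRECONDITION & SPEC =====
-- Pre_ excludes num_item_types = 0 (both programs raise ZeroDivisionError) and, via the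
-- len % num == 0 condition, every input where A's assert raises. It also excludes
-- num_item_types < 0, which is outside the natural domain (a count of item types): there A
-- accidentally returns [] because range() of a negative number is empty, while B raises IndexError.
def Pre_vector_to_item_integers (vector : List Int) (num_item_types : Int) : Prop :=
  0 < num_item_types ∧ PySem.Int.mod (PySem.List.len vector) num_item_types = 0
instance (vector : List Int) (num_item_types : Int) : Decidable (Pre_vector_to_item_integers vector num_item_types) := by unfold Pre_vector_to_item_integers; infer_instance

def pvWitness_vector_to_item_integers : List Int × Int := ([2, 3, 0, 1], 2)

def Spec_vector_to_item_integers (vector : List Int) (num_item_types : Int) (out : List Int) : Prop := out = vector_to_item_integers_alt vector num_item_types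
instance (vector : List Int) (num_item_types : Int) (out : List Int) : Decidable (Spec_vector_to_item_integers vector num_item_types out) := by unfold Spec_vector_to_item_integers; infer_instance

-- ===== CLAIM (what is proved, stated in full; the proofs are below) =====
def Claim_equal_vector_to_item_integers : Prop := ∀ (vector : List Int) (num_item_types : Int), Dom_vector_to_item_integers vector num_item_types → Pre_vector_to_item_integers vector num_item_types → Spec_vector_to_item_integers vector num_item_types (vector_to_item_integers vector num_item_types)

-- ===== LEMMAS AND PROOFS =====

lemma pv_floordiv_len (v : List Int) (num : Int) (hnum : 0 < num) :
    PySem.Int.floordiv (v.length : Int) num = ((v.length / num.toNat : Nat) : Int) := by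
  have h : num = ((num.toNat : Nat) : Int) := by omega
  rw [h, PySem.Int.floordiv_natCast]; simp

-- under Pre_, Python's int(len/num) is exact division
lemma pv_truncdiv_len (v : List Int) (num : Int) (hnum : 0 < num) (hd : num ∣ (v.length : Int)) :
    PySem.Int.truncdiv (v.length : Int) num = ((v.length / num.toNat : Nat) : Int) := by
  have h1 : PySem.Int.truncdiv (v.length : Int) num = PySem.Int.floordiv (v.length : Int) num := by
    simp [PySem.Int.truncdiv, PySem.Int.floordiv,
      Int.tdiv_eq_ediv_of_dvd hd, Int.fdiv_eq_ediv_of_dvd hd]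
  rw [h1, pv_floordiv_len v num hnum]

-- A's loop, characterized as a map over the block indices
lemma portA_eq (v : List Int) (num : Int) (hnum : 0 < num) (hd : num ∣ (v.length : Int)) :
    vector_to_item_integers v num =
      (List.range num.toNat).map
        (fun k => ((v.drop (k * (v.length / num.toNat))).take (v.length / num.toNat)).sum - 1) := by
  unfold vector_to_item_integers
  simp only [PySem.List.len_eq]
  rw [pv_truncdiv_len v num hnum hd]
  rw [PySem.List.foldl_append_singleton_eq_map]
  rw [PySem.List.pyRange_one]
  rw [List.map_map]
  simp only [Int.sub_zero]
  apply List.map_congr_left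
  intro k _
  simp only [Function.comp]
  have e1 : (0 + (k:Int)) * ((v.length / num.toNat : Nat) : Int) = ((k * (v.length / num.toNat) : Nat) : Int) := by push_cast; ring
  have e2 : (0 + (k:Int) + 1) * ((v.length / num.toNat : Nat) : Int) = ((k * (v.length / num.toNat) : Nat) : Int) + ((v.length / num.toNat : Nat) : Int) := by push_cast; ring
  rw [e1, e2, PySem.List.slice_natCast_add]

-- B's inner pass over one block of length L: it accumulates that block's sum into slot acc.length
lemma pv_fill (L : Nat) (hL : 0 < L) (b : List Int) : ∀ (j : Nat) (acc tail : List Int) (cur : Int),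
    b.length + j = L →
    (PySem.List.enumerate b ((acc.length * L + j : Nat) : Int)).foldl
      (fun iv p =>
        PySem.List.pySetD iv (PySem.Int.floordiv p.1 (L : Int))
          (PySem.List.pyGetD iv (PySem.Int.floordiv p.1 (L : Int)) 0 + p.2))
      (acc ++ cur :: tail)
      = acc ++ (cur + b.sum) :: tail := by
  induction b with
  | nil =>
    intro j acc tail cur h
    simp [PySem.List.enumerate_nil]
  | cons x b ih =>
    intro j acc tail cur h
    simp only [List.length_cons] at h
    rw [PySem.List.enumerate_cons]
    simp only [List.foldl_cons]
    have hj : j < L := by omega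
    have hdiv : (acc.length * L + j) / L = acc.length := by
      rw [Nat.mul_comm acc.length L, Nat.mul_add_div hL]
      simp [Nat.div_eq_of_lt hj]
    have hget : (acc ++ cur :: tail).getD acc.length 0 = cur := by
      simp [List.getD_eq_getElem?_getD]
    have hset : (acc ++ cur :: tail).set acc.length (cur + x) = acc ++ (cur + x) :: tail := by
      rw [List.set_append_right _ _ (le_refl acc.length)]
      simp
    have hstart : ((acc.length * L + j : Nat) : Int) + 1 = ((acc.length * L + (j+1) : Nat) : Int) := by
      push_cast; ring
    simp only [PySem.Int.floordiv_natCast, hdiv, PySem.List.pyGetD_natCast,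
      PySem.List.pySetD_natCast, hget, hset, hstart]
    rw [ih (j+1) acc tail (cur + x) (by omega)]
    simp; ring

-- B's pass over n whole blocks of length L
lemma pv_blocks (L : Nat) (hL : 0 < L) : ∀ (n : Nat) (v acc : List Int),
    v.length = n * L →
    (PySem.List.enumerate v ((acc.length * L : Nat) : Int)).foldl
      (fun iv p =>
        PySem.List.pySetD iv (PySem.Int.floordiv p.1 (L : Int))
          (PySem.List.pyGetD iv (PySem.Int.floordiv p.1 (L : Int)) 0 + p.2))
      (acc ++ List.replicate n (-1))
      = acc ++ (List.range n).map (fun k => ((v.drop (k * L)).take L).sum - 1) := by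
  intro n
  induction n with
  | zero =>
    intro v acc h
    have hv : v = [] := List.eq_nil_of_length_eq_zero (by simpa using h)
    subst hv
    simp [PySem.List.enumerate_nil]
  | succ n ih =>
    intro v acc h
    have hLle : L ≤ v.length := by simp [h]; nlinarith
    have hb : (v.take L).length = L := List.length_take_of_le hLle
    have hrest : (v.drop L).length = n * L := by simp [h]; ring_nf; omega
    conv_lhs => rw [← List.take_append_drop L v]
    rw [PySem.List.enumerate_append, List.foldl_append, List.replicate_succ]
    have h0 : ((acc.length * L : Nat) : Int) = ((acc.length * L + 0 : Nat) : Int) := by simp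
    rw [h0, pv_fill L hL (v.take L) 0 acc (List.replicate n (-1)) (-1) (by omega)]
    have hacc1 : (acc ++ [-1 + (v.take L).sum]).length = acc.length + 1 := by simp
    have hstart : ((acc.length * L + 0 : Nat) : Int) + ((v.take L).length : Int)
        = (((acc ++ [-1 + (v.take L).sum]).length * L : Nat) : Int) := by
      rw [hacc1, hb]; push_cast; ring
    have hsplit : acc ++ (-1 + (v.take L).sum) :: List.replicate n (-1)
        = (acc ++ [-1 + (v.take L).sum]) ++ List.replicate n (-1) := by simp
    rw [hsplit, hstart, ih (v.drop L) (acc ++ [-1 + (v.take L).sum]) hrest]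
    rw [List.range_succ_eq_map, List.map_cons, List.map_map]
    have hf0 : ((v.drop (0 * L)).take L).sum - 1 = -1 + (v.take L).sum := by simp; ring
    have hfs : ∀ k : Nat, (((v.drop L).drop (k * L)).take L).sum - 1
        = ((v.drop (Nat.succ k * L)).take L).sum - 1 := by
      intro k
      rw [List.drop_drop]
      rw [Nat.add_comm, Nat.succ_mul]
    simp only [hfs, hf0]
    simp

-- B's loop, characterized by the same map over the block indices
lemma portB_eq (v : List Int) (num : Int) (hnum : 0 < num) (hd : num ∣ (v.length : Int)) :
    vector_to_item_integers_alt v num =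
      (List.range num.toNat).map
        (fun k => ((v.drop (k * (v.length / num.toNat))).take (v.length / num.toNat)).sum - 1) := by
  have hdn : num.toNat ∣ v.length := by
    obtain ⟨c, hc⟩ := hd
    have hc0 : 0 ≤ c := by nlinarith
    refine ⟨c.toNat, ?_⟩
    have hcast : (v.length : Int) = (num.toNat : Int) * (c.toNat : Int) := by
      rw [Int.toNat_of_nonneg hnum.le, Int.toNat_of_nonneg hc0]; exact hc
    exact_mod_cast hcast
  unfold vector_to_item_integers_alt
  simp only [PySem.List.len_eq]
  rw [pv_floordiv_len v num hnum, PySem.List.pyRepeat_singleton]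
  set L := v.length / num.toNat with hL
  have hlen : v.length = num.toNat * L := (Nat.mul_div_cancel' hdn).symm
  by_cases hL0 : L = 0
  · have hv : v = [] := by
      have : v.length = 0 := by rw [hlen, hL0, Nat.mul_zero]
      exact List.eq_nil_of_length_eq_zero this
    subst hv
    simp [PySem.List.enumerate_nil]
  · have hpos : 0 < L := Nat.pos_of_ne_zero hL0
    have hb := pv_blocks L hpos num.toNat v [] hlen
    simp only [List.length_nil, Nat.zero_mul, Nat.cast_zero, List.nil_append] at hb
    exact hb

-- ===== VERDICT (by name: the statement is the Claim_ definition above) =====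
theorem vector_to_item_integers_spec : Claim_equal_vector_to_item_integers := by
  intro v num _ hpre
  obtain ⟨hnum, hmod⟩ := hpre
  have hd : num ∣ (v.length : Int) := by
    have := (PySem.Int.mod_eq_zero_iff_dvd (PySem.List.len v) num).mp hmod
    simpa [PySem.List.len_eq] using this
  unfold Spec_vector_to_item_integers
  rw [portA_eq v num hnum hd, portB_eq v num hnum hd]
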